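-- pv_equiv track=rewrite | github.com/Sergey-Mirzoyan/DevSecOps-try | Финал Oчка/Реализации/Визуализация/магистратура 2.py | fill_4
-- ===== SOURCE A (Python) =====
-- def fill_4(W,H):
--     current_field = next_field = [[0 for i in range(W)] for j in range(H)]
--
--     for j in range(H):
--         for i in range(W):
--             if i % 2:
--                 current_field[j][i] = 2
--             else:
--                 current_field[j][i] = 0
--     return next_field, current_field
-- ===== SOURCE B (Python) =====
-- def fill_4(W, H):
--     if H <= 0:
--         return [], []
--     w = W if W > 0 else 0
--     row = [0, 2] * (w // 2) + [0] * (w % 2)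
--     grid = [row] * H
--     return grid, grid
-- ===== Notes on version B (the rewrite author's own statement) =====
-- stated objective: faster
-- what changed: B builds the single alternating row by tiling [0,2] blocks with list multiplication (w//2 blocks plus a trailing 0 for odd w) and replicates it with [row]*H (early empty return for H<=0), eliminating A's per-cell index loops and parity tests; intended as faster, and a timing run measured B ~2.9-3.3x faster than A at its largest sizes.
import Mathlib
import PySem

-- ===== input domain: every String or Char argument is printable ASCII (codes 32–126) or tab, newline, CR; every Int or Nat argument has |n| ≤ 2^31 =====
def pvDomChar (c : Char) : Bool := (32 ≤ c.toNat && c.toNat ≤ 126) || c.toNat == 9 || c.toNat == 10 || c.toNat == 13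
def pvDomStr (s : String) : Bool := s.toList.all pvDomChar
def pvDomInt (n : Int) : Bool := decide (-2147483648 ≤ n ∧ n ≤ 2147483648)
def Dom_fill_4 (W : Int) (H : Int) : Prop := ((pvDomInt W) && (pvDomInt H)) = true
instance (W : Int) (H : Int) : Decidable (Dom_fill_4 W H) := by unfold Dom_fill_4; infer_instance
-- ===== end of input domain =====

-- B tiles [0,2] blocks by list multiplication and replicates the one row, instead of A's per-cell
-- rewrite loops; equivalence is about the RETURN value (A mutates only its freshly built local grid,
-- unobservable; B's rows share one list object, which value comparison does not distinguish).

-- ===== PORT A =====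
-- indices j, i come from range(H)/range(W), hence are nonnegative and in range, so
-- pySetD/pyGetD are exact for Python's list indexing here
def fill_4 (W : Int) (H : Int) : List (List Int) × List (List Int) :=
  let field0 : List (List Int) :=
    (PySem.List.pyRange 0 H 1).map (fun _j => (PySem.List.pyRange 0 W 1).map (fun _i => (0 : Int)))
  let field : List (List Int) :=
    (PySem.List.pyRange 0 H 1).foldl (fun g j =>
      (PySem.List.pyRange 0 W 1).foldl (fun g' i =>
        PySem.List.pySetD g' j
          (PySem.List.pySetD (PySem.List.pyGetD g' j [])
            i (if PySem.Int.mod i 2 ≠ 0 then (2 : Int) else 0))) g) field0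
  (field, field)

-- ===== PORT B =====
def fill_4_alt (W : Int) (H : Int) : List (List Int) × List (List Int) :=
  if H ≤ 0 then ([], []) else
  let w : Int := if W > 0 then W else 0
  let row : List Int :=
    PySem.List.pyRepeat [(0 : Int), 2] (PySem.Int.floordiv w 2)
      ++ PySem.List.pyRepeat [(0 : Int)] (PySem.Int.mod w 2)
  let grid : List (List Int) := PySem.List.pyRepeat [row] H
  (grid, grid)

-- ===== PRECONDITION & SPEC =====
def Spec_fill_4 (W : Int) (H : Int) (out : List (List Int) × List (List Int)) : Prop := out = fill_4_alt W H
instance (W : Int) (H : Int) (out : List (List Int) × List (List Int)) : Decidable (Spec_fill_4 W H out) := by unfold Spec_fill_4; infer_instance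

-- ===== CLAIM (what is proved, stated in full; the proofs are below) =====
def Claim_equal_fill_4 : Prop := ∀ (W : Int) (H : Int), Dom_fill_4 W H → Spec_fill_4 W H (fill_4 W H)

-- ===== LEMMAS AND PROOFS =====

theorem pyRange_toNat (n : Int) :
    PySem.List.pyRange 0 n 1 = PySem.List.pyRange 0 (n.toNat : Int) 1 := by
  rw [PySem.List.pyRange_one, PySem.List.pyRange_one]
  congr 2
  omega

-- the inner `for i` loop only rewrites row j: it collapses to one pySetD of the folded row
theorem inner_collapse (L : List Int) (f : Int → Int) :
    ∀ (g : List (List Int)) (j : Nat), j < g.length →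
    L.foldl (fun g' i =>
        PySem.List.pySetD g' (j : Int)
          (PySem.List.pySetD (PySem.List.pyGetD g' (j : Int) []) i (f i))) g
      = PySem.List.pySetD g (j : Int)
          (L.foldl (fun r i => PySem.List.pySetD r i (f i)) (PySem.List.pyGetD g (j : Int) [])) := by
  induction L with
  | nil =>
    intro g j hj
    simp [PySem.List.pySetD_natCast, PySem.List.pyGetD_natCast, List.getD,
      List.getElem?_eq_getElem hj, List.set_getElem_self hj]
  | cons x L ih =>
    intro g j hj
    have hlen : (PySem.List.pySetD g (j : Int)
        (PySem.List.pySetD (PySem.List.pyGetD g (j : Int) []) x (f x))).length = g.length := by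
      simp [PySem.List.pySetD_natCast]
    simp only [List.foldl_cons]
    rw [ih _ j (by rw [hlen]; exact hj)]
    simp [PySem.List.pySetD_natCast, PySem.List.pyGetD_natCast, List.getD, hj, List.set_set]

-- folding pySetD over the indices 0..m-1 overwrites the first m entries with F of the index
theorem foldl_set_prefix {α : Type} (F : Int → α) :
    ∀ (m : Nat) (z : List α), m ≤ z.length →
    (PySem.List.pyRange 0 (m : Int) 1).foldl (fun r i => PySem.List.pySetD r i (F i)) z
      = (PySem.List.pyRange 0 (m : Int) 1).map F ++ z.drop m := by
  intro m
  induction m with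
  | zero =>
    intro z _
    simp [PySem.List.pyRange_one_eq_nil (le_refl (0 : Int))]
  | succ m ih =>
    intro z hm
    have hsplit : PySem.List.pyRange 0 ((m + 1 : Nat) : Int) 1
        = PySem.List.pyRange 0 (m : Int) 1 ++ [(m : Int)] := by
      push_cast
      exact PySem.List.pyRange_one_succ_right (by positivity)
    have hm' : m < z.length := hm
    have hpre : ((PySem.List.pyRange 0 (m : Int) 1).map F).length = m := by
      simp [PySem.List.length_pyRange_one]
    have hset : (z.drop m).set 0 (F (m : Int)) = F (m : Int) :: z.drop (m + 1) := by
      rw [List.drop_eq_getElem_cons hm', List.set_cons_zero]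
    rw [hsplit, List.foldl_append, List.map_append, ih z (Nat.le_of_succ_le hm)]
    simp only [List.foldl_cons, List.foldl_nil, PySem.List.pySetD_natCast]
    rw [List.set_append]
    simp [hpre, hset]

-- outer loop: each row of length W.toNat gets rewritten to the alternating pattern
theorem outer_fold (W : Int) (f : Int → Int) :
    ∀ (m : Nat) (g : List (List Int)), m ≤ g.length →
    (∀ r ∈ g, r.length = W.toNat) →
    (PySem.List.pyRange 0 (m : Int) 1).foldl
      (fun g' j =>
        (PySem.List.pyRange 0 W 1).foldl (fun g'' i =>
          PySem.List.pySetD g'' j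
            (PySem.List.pySetD (PySem.List.pyGetD g'' j []) i (f i))) g') g
      = (PySem.List.pyRange 0 (m : Int) 1).map (fun _ => (PySem.List.pyRange 0 W 1).map f)
          ++ g.drop m := by
  intro m
  induction m with
  | zero =>
    intro g _ _
    simp [PySem.List.pyRange_one_eq_nil (le_refl (0 : Int))]
  | succ m ih =>
    intro g hm hrow
    have hsplit : PySem.List.pyRange 0 ((m + 1 : Nat) : Int) 1
        = PySem.List.pyRange 0 (m : Int) 1 ++ [(m : Int)] := by
      push_cast
      exact PySem.List.pyRange_one_succ_right (by positivity)
    have hm' : m < g.length := hm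
    set pat := (PySem.List.pyRange 0 W 1).map f with hpat
    have hpre : ((PySem.List.pyRange 0 (m : Int) 1).map (fun _ => pat)).length = m := by
      simp [PySem.List.length_pyRange_one]
    rw [hsplit, List.foldl_append, List.map_append, ih g (Nat.le_of_succ_le hm) hrow]
    set gm := (PySem.List.pyRange 0 (m : Int) 1).map (fun _ => pat) ++ g.drop m with hgm
    have hglen : gm.length = g.length := by
      rw [hgm]; simp [hpre]; omega
    simp only [List.foldl_cons, List.foldl_nil]
    rw [inner_collapse (PySem.List.pyRange 0 W 1) f gm m (by rw [hglen]; exact hm')]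
    have hget : PySem.List.pyGetD gm (m : Int) [] = g[m] := by
      rw [PySem.List.pyGetD_natCast, hgm, List.getD,
        List.getElem?_append_right (by simp [hpre])]
      simp [hm']
    rw [hget]
    have hrowlen : g[m].length = W.toNat := hrow _ (List.getElem_mem hm')
    have hfold : (PySem.List.pyRange 0 W 1).foldl
        (fun r i => PySem.List.pySetD r i (f i)) g[m] = pat := by
      rw [pyRange_toNat W] at hpat ⊢
      rw [foldl_set_prefix f W.toNat g[m] (by omega)]
      simp [hpat, hrowlen]
    have hset : (g.drop m).set 0 pat = pat :: g.drop (m + 1) := by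
      rw [List.drop_eq_getElem_cons hm', List.set_cons_zero]
    rw [hfold, PySem.List.pySetD_natCast, hgm, List.set_append]
    simp [hset]

-- the parity map over range(2k) IS the k-fold tiling of [0, 2]
theorem tile_even (f : Int → Int) (hf0 : ∀ k : Nat, f (2 * k) = 0)
    (hf1 : ∀ k : Nat, f (2 * k + 1) = 2) :
    ∀ k : Nat, (PySem.List.pyRange 0 ((2 * k : Nat) : Int) 1).map f
      = (List.replicate k [(0 : Int), 2]).flatten := by
  intro k
  induction k with
  | zero => simp [PySem.List.pyRange_one_eq_nil (le_refl (0 : Int))]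
  | succ k ih =>
    have h1 : PySem.List.pyRange 0 ((2 * (k + 1) : Nat) : Int) 1
        = PySem.List.pyRange 0 ((2 * k : Nat) : Int) 1
          ++ [((2 * k : Nat) : Int), ((2 * k : Nat) : Int) + 1] := by
      have e1 : ((2 * (k + 1) : Nat) : Int) = ((2 * k : Nat) : Int) + 1 + 1 := by push_cast; ring
      rw [e1, PySem.List.pyRange_one_succ_right (by positivity),
        PySem.List.pyRange_one_succ_right (by positivity)]
      simp
    rw [h1, List.map_append, ih]
    have h2 := hf0 k
    have h3 := hf1 k
    simp only [List.map_cons, List.map_nil]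
    rw [List.replicate_succ', List.flatten_append]
    simp_all

theorem fill_4_eq (W H : Int) : fill_4 W H = fill_4_alt W H := by
  set f : Int → Int := fun i => if PySem.Int.mod i 2 ≠ 0 then (2 : Int) else 0 with hfdef
  have hf0 : ∀ k : Nat, f (2 * k) = 0 := by
    intro k
    have h : PySem.Int.mod (2 * (k : Int)) 2 = (2 * (k : Int)) % 2 :=
      PySem.Int.mod_eq_emod_of_pos (by norm_num)
    simp [hfdef]
  have hf1 : ∀ k : Nat, f (2 * k + 1) = 2 := by
    intro k
    have hm : PySem.Int.mod (2 * (k : Int) + 1) 2 = (2 * (k : Int) + 1) % 2 :=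
      PySem.Int.mod_eq_emod_of_pos (by norm_num)
    have h1 : (2 * (k : Int) + 1) % 2 = 1 := by omega
    simp [hfdef, h1]
  have hw : (if W > 0 then W else 0) = (W.toNat : Int) := by split <;> omega
  -- B's row equals the parity map over range(W)
  have hrow : PySem.List.pyRepeat [(0 : Int), 2] (PySem.Int.floordiv (if W > 0 then W else 0) 2)
        ++ PySem.List.pyRepeat [(0 : Int)] (PySem.Int.mod (if W > 0 then W else 0) 2)
      = (PySem.List.pyRange 0 W 1).map f := by
    rw [hw, pyRange_toNat W]
    rw [show PySem.Int.floordiv ((W.toNat : Int)) 2 = ((W.toNat / 2 : Nat) : Int) from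
          PySem.Int.floordiv_natCast W.toNat 2,
        show PySem.Int.mod ((W.toNat : Int)) 2 = ((W.toNat % 2 : Nat) : Int) from
          PySem.Int.mod_natCast W.toNat 2]
    rcases Nat.even_or_odd W.toNat with ⟨k, hk⟩ | ⟨k, hk⟩
    · have hk2 : W.toNat = 2 * k := by omega
      rw [hk2, tile_even f hf0 hf1 k]
      simp [PySem.List.pyRepeat, Nat.mul_mod_right]
    · rw [hk]
      have hsp : PySem.List.pyRange 0 ((2 * k + 1 : Nat) : Int) 1
          = PySem.List.pyRange 0 ((2 * k : Nat) : Int) 1 ++ [((2 * k : Nat) : Int)] := by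
        have e1 : ((2 * k + 1 : Nat) : Int) = ((2 * k : Nat) : Int) + 1 := by push_cast; ring
        rw [e1, PySem.List.pyRange_one_succ_right (by positivity)]
      rw [hsp, List.map_append, tile_even f hf0 hf1 k]
      have h2 := hf0 k
      have hd : (2 * k + 1) / 2 = k := by omega
      have hmm : (2 * k + 1) % 2 = 1 := by omega
      simp_all [PySem.List.pyRepeat]
  by_cases hH0 : H ≤ 0
  · simp [fill_4, fill_4_alt, hH0, PySem.List.pyRange_one_eq_nil hH0]
  · simp only [fill_4, fill_4_alt, if_neg hH0]
    rw [pyRange_toNat H]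
    set zero := (PySem.List.pyRange 0 W 1).map (fun _i => (0 : Int)) with hz
    set g0 := (PySem.List.pyRange 0 (H.toNat : Int) 1).map (fun _j => zero) with hg0
    have hlen : g0.length = H.toNat := by
      rw [hg0]; simp [PySem.List.length_pyRange_one]; omega
    have hrowz : ∀ r ∈ g0, r.length = W.toNat := by
      intro r hr
      rw [hg0] at hr
      simp only [List.mem_map] at hr
      obtain ⟨_, _, rfl⟩ := hr
      simp [hz, PySem.List.length_pyRange_one]
    have h := outer_fold W f H.toNat g0 hlen.ge hrowz
    simp only [] at h
    rw [h, ← hlen, List.drop_length, List.append_nil, hlen]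
    rw [hrow, PySem.List.pyRepeat_singleton]
    have hmapconst : (PySem.List.pyRange 0 ((H.toNat : Nat) : Int) 1).map
          (fun _ => (PySem.List.pyRange 0 W 1).map f)
        = List.replicate H.toNat ((PySem.List.pyRange 0 W 1).map f) := by
      rw [List.map_const']
      congr 1
      simp [PySem.List.length_pyRange_one]
      omega
    exact Prod.ext (by rw [hmapconst]) (by rw [hmapconst])

-- ===== VERDICT (by name: the statement is the Claim_ definition above) =====
theorem fill_4_spec : Claim_equal_fill_4 := by
  intro W H _
  unfold Spec_fill_4
  exact fill_4_eq W H
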